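-- pv_equiv track=rewrite | github.com/Naaaokii/Algos_tris | python/test_tris.py | tri_bulles_mieux
-- ===== SOURCE A (Python) =====
-- def tri_bulles_mieux(T):
--     Continue = True
--     passage = 0
--     compteur = 0
--     while Continue == True:
--         Continue = False  # it is assumed that there are no more exchanges to be made
--         passage += 1
--         for beginning in range(0, len(T) - passage):
--             compteur += 1
--             if T[beginning] > T[beginning + 1]:
--                 Continue = True  # we must continue because an exchange has been made
--                 provisional = T[beginning + 1]
--                 T[beginning + 1] = T[beginning]
--                 T[beginning] = provisional
--                 compteur += 3
--     return compteur
-- ===== SOURCE B (Python) =====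
-- def tri_bulles_mieux(T):
--     # Closed-form count, no sorting or swapping: total = comparisons + 3*inversions;
--     # the comparison total follows from the pass count, which is 1 + the maximum
--     # number of strictly greater elements preceding an element.
--     # Does not mutate T (A bubble-sorts T in place).
--     n = len(T)
--     if n == 0:
--         return 0
--     inv = 0
--     k = 0
--     seen = []
--     for x in T:
--         gb = sum(1 for y in seen if y > x)
--         inv += gb
--         if gb > k:
--             k = gb
--         seen.append(x)
--     passes = k + 1
--     return passes * n - passes * (passes + 1) // 2 + 3 * inv
-- ===== Notes on version B (the rewrite author's own statement) =====
-- stated objective: alternative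
-- what changed: B never sorts or simulates bubble passes: it makes one sweep counting, per element, the strictly greater elements before it, taking the total as the inversion/swap count and the maximum as the pass count, and returns the closed-form comparison total plus 3x inversions (A bubble-sorts T in place; B leaves T untouched).
import Mathlib
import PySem

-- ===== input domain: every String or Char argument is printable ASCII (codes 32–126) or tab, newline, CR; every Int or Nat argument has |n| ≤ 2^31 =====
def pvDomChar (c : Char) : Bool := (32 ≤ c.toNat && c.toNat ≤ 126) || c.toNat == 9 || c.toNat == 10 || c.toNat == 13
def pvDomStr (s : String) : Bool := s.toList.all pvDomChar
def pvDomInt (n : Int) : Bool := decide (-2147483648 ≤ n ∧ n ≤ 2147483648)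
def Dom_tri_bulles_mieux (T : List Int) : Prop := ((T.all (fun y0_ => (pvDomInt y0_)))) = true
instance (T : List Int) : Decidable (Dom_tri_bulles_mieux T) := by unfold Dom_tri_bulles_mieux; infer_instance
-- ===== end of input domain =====

-- B replaces the repeated swapping passes by one closed-form count (comparisons from the
-- maximal number of strictly greater predecessors, swaps from the inversion count).
-- A sorts T in place; B does not mutate its argument — the equivalence proved here is
-- about the return value only.

-- ===== PORT A =====
-- one 'for beginning in range(0, len(T) - passage)' pass: m comparisons from the left,
-- adjacent swap when T[beginning] > T[beginning+1]; returns (list, counter increment, swapped?)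
def bpass : List Int → Nat → (List Int × Int × Bool)
  | l, 0 => (l, 0, false)
  | [], _ + 1 => ([], 0, false)          -- unreachable: m ≤ len l - 1 in A
  | [a], _ + 1 => ([a], 0, false)        -- unreachable
  | a :: b :: rest, m + 1 =>
    if b < a then
      let r := bpass (a :: rest) m
      (b :: r.1, r.2.1 + 4, true)        -- compteur += 1; swap; compteur += 3
    else
      let r := bpass (b :: rest) m
      (a :: r.1, r.2.1 + 1, r.2.2)       -- compteur += 1

-- the 'while Continue == True' loop; fuel len T + 1 is an upper bound on the pass count
-- (proved inside the main theorem: the loop stops after (max greater-before count) + 1 passes)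
def bloop : Nat → List Int → Nat → Int → Int
  | 0, _, _, c => c
  | fuel + 1, l, passage, c =>
    let r := bpass l (l.length - passage)
    if r.2.2 then bloop fuel r.1 (passage + 1) (c + r.2.1) else c + r.2.1

def tri_bulles_mieux (T : List Int) : Int := bloop (T.length + 1) T 1 0

-- ===== PORT B =====
-- single sweep of Source B: for each x, gb = #{y in seen | y > x}; inv += gb; k = max k gb
def altGo : List Int → List Int → Int → Int → (Int × Int)
  | [], _, inv, k => (inv, k)
  | x :: xs, seen, inv, k =>
    let gb : Int := (seen.countP (fun y => decide (y > x)) : Nat)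
    altGo xs (seen ++ [x]) (inv + gb) (if gb > k then gb else k)

def tri_bulles_mieux_alt (T : List Int) : Int :=
  let n : Int := T.length
  if T.length = 0 then 0
  else
    let r := altGo T [] 0 0
    let passes := r.2 + 1
    passes * n - PySem.Int.floordiv (passes * (passes + 1)) 2 + 3 * r.1

-- ===== PRECONDITION & SPEC =====
def Spec_tri_bulles_mieux (T : List Int) (out : Int) : Prop := out = tri_bulles_mieux_alt T
instance (T : List Int) (out : Int) : Decidable (Spec_tri_bulles_mieux T out) := by unfold Spec_tri_bulles_mieux; infer_instance

-- ===== CLAIM (what is proved, stated in full; the proofs are below) =====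
def Claim_equal_tri_bulles_mieux : Prop := ∀ (T : List Int), Dom_tri_bulles_mieux T → Spec_tri_bulles_mieux T (tri_bulles_mieux T)

-- ===== LEMMAS AND PROOFS =====

-- number of elements of pre strictly greater than x ("greater-before" count)
def gbcnt (pre : List Int) (x : Int) : Nat := pre.countP (fun y => decide (y > x))

-- the greater-before profile of l, read after the prefix pre
def gbl (pre : List Int) : List Int → List Nat
  | [] => []
  | x :: xs => gbcnt pre x :: gbl (pre ++ [x]) xs

def maxl (s : List Nat) : Nat := s.foldr max 0

-- inversion count (pairs i < j with l[i] > l[j]), counted as "smaller elements after"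
def invc : List Int → Nat
  | [] => 0
  | x :: xs => xs.countP (fun y => decide (y < x)) + invc xs

-- one full bubble pass over the whole list: (resulting list, number of swaps)
def fpass : List Int → List Int × Nat
  | [] => ([], 0)
  | [a] => ([a], 0)
  | a :: b :: rest =>
    if b < a then
      let r := fpass (a :: rest)
      (b :: r.1, r.2 + 1)
    else
      let r := fpass (b :: rest)
      (a :: r.1, r.2)

-- csum k m = sum_{j=0}^{k} (m - j)   (the comparison totals of the successive passes)
def csum : Nat → Nat → Nat
  | 0, m => m
  | k + 1, m => m + csum k (m - 1)

lemma bpass_succ (a b : Int) (l : List Int) (m : Nat) :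
    bpass (a :: b :: l) (m + 1) =
      if b < a then
        (b :: (bpass (a :: l) m).1, (bpass (a :: l) m).2.1 + 4, true)
      else
        (a :: (bpass (b :: l) m).1, (bpass (b :: l) m).2.1 + 1, (bpass (b :: l) m).2.2) :=
  bpass.eq_4 a b l m

lemma bloop_succ (fuel : Nat) (l : List Int) (p : Nat) (c : Int) :
    bloop (fuel + 1) l p c =
      (if (bpass l (l.length - p)).2.2 then
        bloop fuel (bpass l (l.length - p)).1 (p + 1) (c + (bpass l (l.length - p)).2.1)
      else c + (bpass l (l.length - p)).2.1) :=
  bloop.eq_2 l p c fuel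

lemma fpass_perm (l : List Int) : (fpass l).1.Perm l := by
  fun_induction fpass l with
  | case1 => simp
  | case2 => simp
  | case3 a b rest h r ih => exact (ih.cons b).trans (List.Perm.swap a b rest)
  | case4 a b rest h r ih => exact ih.cons a

lemma bpass_split (front : List Int) (h : front ≠ []) : ∀ tail,
    bpass (front ++ tail) (front.length - 1) =
      ((fpass front).1 ++ tail, ((front.length : Int) - 1) + 3 * (fpass front).2,
        decide ((fpass front).2 ≠ 0)) := by
  fun_induction fpass front with
  | case1 => exact absurd rfl h
  | case2 a => intro tail; simp [bpass]
  | case3 a b rest hba r ih =>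
    intro tail
    have hl : (a :: b :: rest).length - 1 = rest.length + 1 := by simp
    have hl2 : (a :: rest).length - 1 = rest.length := by simp
    have ih' := ih (by simp) tail
    rw [hl2] at ih'
    rw [hl]
    simp only [List.cons_append, bpass_succ, if_pos hba]
    rw [List.cons_append] at ih'
    rw [ih']
    simp only [Prod.mk.injEq]
    refine ⟨rfl, by push_cast [List.length_cons]; ring, by simp⟩
  | case4 a b rest hba r ih =>
    intro tail
    have hl : (a :: b :: rest).length - 1 = rest.length + 1 := by simp
    have hl2 : (b :: rest).length - 1 = rest.length := by simp
    have ih' := ih (by simp) tail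
    rw [hl2] at ih'
    rw [hl]
    simp only [List.cons_append, bpass_succ, if_neg hba]
    rw [List.cons_append] at ih'
    rw [ih']
    simp only [Prod.mk.injEq]
    refine ⟨rfl, by push_cast [List.length_cons]; ring, rfl⟩

lemma invc_fpass (l : List Int) : invc l = invc (fpass l).1 + (fpass l).2 := by
  fun_induction fpass l with
  | case1 => simp [invc]
  | case2 a => simp [invc]
  | case3 a b rest hba r ih =>
    have hr : r = fpass (a :: rest) := rfl
    have hc : (fpass (a :: rest)).1.countP (fun y => decide (y < b))
        = (a :: rest).countP (fun y => decide (y < b)) :=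
      (fpass_perm (a :: rest)).countP_congr (fun x _ => rfl)
    simp only [invc, List.countP_cons, decide_eq_true_eq, if_pos hba,
      if_neg (show ¬ a < b by omega)] at *
    rw [hr]
    omega
  | case4 a b rest hba r ih =>
    have hr : r = fpass (b :: rest) := rfl
    have hc : (fpass (b :: rest)).1.countP (fun y => decide (y < a))
        = (b :: rest).countP (fun y => decide (y < a)) :=
      (fpass_perm (b :: rest)).countP_congr (fun x _ => rfl)
    simp only [invc, List.countP_cons, decide_eq_true_eq, if_neg hba] at *
    rw [hr]
    omega

lemma invc_append (u v : List Int) :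
    invc (u ++ v) = invc u + invc v + (u.map (fun x => v.countP (fun y => decide (y < x)))).sum := by
  induction u with
  | nil => simp [invc]
  | cons x u ih => simp only [List.cons_append, invc, List.countP_append, List.map_cons,
      List.sum_cons, ih]; omega

lemma gbl_append (pre u v : List Int) : gbl pre (u ++ v) = gbl pre u ++ gbl (pre ++ u) v := by
  induction u generalizing pre with
  | nil => simp [gbl]
  | cons x u ih => simp [gbl, ih, List.append_assoc]

lemma gbl_congr_perm {pre pre' : List Int} (h : pre.Perm pre') (l : List Int) :
    gbl pre l = gbl pre' l := by
  induction l generalizing pre pre' with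
  | nil => rfl
  | cons x xs ih =>
    simp only [gbl, gbcnt]
    rw [h.countP_congr (fun y _ => rfl), ih (h.append_right [x])]

lemma gbl_zeros (l : List Int) : ∀ pre, (∀ z ∈ l, ∀ y ∈ pre, y ≤ z) →
    List.Pairwise (· ≤ ·) l → ∀ e ∈ gbl pre l, e = 0 := by
  induction l with
  | nil => intro pre _ _ e he; simp [gbl] at he
  | cons x xs ih =>
    intro pre hdom hs e he
    rw [List.pairwise_cons] at hs
    simp only [gbl, List.mem_cons] at he
    rcases he with he | he
    · subst he
      simp only [gbcnt, List.countP_eq_zero]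
      intro y hy
      simpa using not_lt.mpr (hdom x (by simp) y hy)
    · refine ih (pre ++ [x]) ?_ hs.2 e he
      intro z hz y hy
      rcases List.mem_append.mp hy with hy | hy
      · exact hdom z (by simp [hz]) y hy
      · simp only [List.mem_singleton] at hy; subst hy; exact hs.1 z hz

lemma gbl_all_zero_chain (l : List Int) : ∀ pre, (∀ e ∈ gbl pre l, e = 0) →
    List.IsChain (· ≤ ·) l := by
  induction l with
  | nil => intro _ _; simp
  | cons x xs ih =>
    intro pre h
    match xs with
    | [] => simp
    | y :: rest =>
      rw [List.isChain_cons_cons]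
      have hrec := ih (pre ++ [x]) (fun e he => h e (List.mem_cons_of_mem _ he))
      refine ⟨?_, hrec⟩
      have h2 : gbcnt (pre ++ [x]) y = 0 := h _ (by simp [gbl])
      simp only [gbcnt, List.countP_eq_zero] at h2
      have := h2 x (by simp)
      simpa using this

lemma le_maxl_of_mem {a : Nat} {s : List Nat} (h : a ∈ s) : a ≤ maxl s := by
  induction s with
  | nil => simp at h
  | cons b s ih =>
    rcases List.mem_cons.mp h with h | h
    · subst h; exact le_max_left _ _
    · exact le_trans (ih h) (le_max_right _ _)

lemma maxl_le {s : List Nat} {b : Nat} (h : ∀ a ∈ s, a ≤ b) : maxl s ≤ b := by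
  induction s with
  | nil => simp [maxl]
  | cons a s ih =>
    exact max_le (h a (by simp)) (ih (fun x hx => h x (by simp [hx])))

lemma maxl_perm {s s' : List Nat} (h : s.Perm s') : maxl s = maxl s' := by
  refine Nat.le_antisymm (maxl_le ?_) (maxl_le ?_) <;> intro a ha
  · exact le_maxl_of_mem (h.mem_iff.mp ha)
  · exact le_maxl_of_mem (h.mem_iff.mpr ha)

lemma maxl_map_pred (s : List Nat) : maxl (s.map Nat.pred) = Nat.pred (maxl s) := by
  induction s with
  | nil => simp [maxl]
  | cons a s ih =>
    simp only [List.map_cons, maxl, List.foldr_cons] at *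
    rw [ih]
    rcases Nat.le_total a (List.foldr max 0 s) with h | h
    · rw [max_eq_right h, max_eq_right (Nat.pred_le_pred h)]
    · rw [max_eq_left h, max_eq_left (Nat.pred_le_pred h)]

lemma gbcnt_append_singleton (pre : List Int) (z x : Int) :
    gbcnt (pre ++ [z]) x = gbcnt pre x + (if x < z then 1 else 0) := by
  simp [gbcnt, List.countP_append, List.countP_cons]

-- the key pass lemma: a full bubble pass decrements every positive greater-before entry
lemma gbl_fpass (xs : List Int) : ∀ (a : Int) (pre : List Int), gbcnt pre a = 0 →
    (gbl pre (fpass (a :: xs)).1).Perm ((gbl pre (a :: xs)).map Nat.pred) := by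
  induction xs with
  | nil => intro a pre h; simp [fpass, gbl, h]
  | cons b rest ih =>
    intro a pre h
    by_cases hba : b < a
    · simp only [fpass, if_pos hba]
      have h' : gbcnt (pre ++ [b]) a = 0 := by
        rw [gbcnt_append_singleton, if_neg (by omega)]; omega
      have hih := ih a (pre ++ [b]) h'
      simp only [gbl] at hih ⊢
      have hctx : gbl (pre ++ [b] ++ [a]) rest = gbl (pre ++ [a] ++ [b]) rest :=
        gbl_congr_perm (by
          have : (pre ++ [b] ++ [a]).Perm (pre ++ [a] ++ [b]) := by
            simp only [List.append_assoc]
            exact (List.Perm.refl pre).append (List.Perm.swap _ _ _)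
          exact this) rest
      rw [h', hctx] at hih
      have hgoal := hih.cons (gbcnt pre b)
      refine hgoal.trans ?_
      simp only [List.map_cons, h, Nat.pred_zero,
        gbcnt_append_singleton, if_pos hba]
      simpa [Nat.pred_succ] using List.Perm.swap (0 : Nat) (gbcnt pre b) _
    · simp only [fpass, if_neg hba]
      have hb0 : gbcnt pre b = 0 := by
        have hmono : pre.countP (fun y => decide (y > b)) ≤ pre.countP (fun y => decide (y > a)) := by
          refine List.countP_mono_left ?_
          intro y _ hy
          simp only [decide_eq_true_eq] at *
          omega
        simp only [gbcnt] at *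
        omega
      have h'' : gbcnt (pre ++ [a]) b = 0 := by
        rw [gbcnt_append_singleton, if_neg (by omega)]; omega
      have hih := ih b (pre ++ [a]) h''
      simp only [gbl] at hih ⊢
      have := hih.cons (gbcnt pre a)
      refine this.trans ?_
      simp [h]

lemma fpass_last (l : List Int) (h : l ≠ []) :
    ∃ u M, (fpass l).1 = u ++ [M] ∧ ∀ x ∈ u ++ [M], x ≤ M := by
  fun_induction fpass l with
  | case1 => exact absurd rfl h
  | case2 a => exact ⟨[], a, rfl, by simp⟩
  | case3 a b rest hba r ih =>
    obtain ⟨u, M, hu, hall⟩ := ih (by simp)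
    have haM : a ≤ M := hall a (by rw [← hu]; exact (fpass_perm (a :: rest)).mem_iff.mpr (by simp))
    exact ⟨b :: u, M, by rw [List.cons_append]; exact congrArg (List.cons b) hu, by
      intro x hx
      rcases List.mem_cons.mp hx with hx | hx
      · subst hx; omega
      · exact hall x hx⟩
  | case4 a b rest hba r ih =>
    obtain ⟨u, M, hu, hall⟩ := ih (by simp)
    have hbM : b ≤ M := hall b (by rw [← hu]; exact (fpass_perm (b :: rest)).mem_iff.mpr (by simp))
    exact ⟨a :: u, M, by rw [List.cons_append]; exact congrArg (List.cons a) hu, by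
      intro x hx
      rcases List.mem_cons.mp hx with hx | hx
      · subst hx; omega
      · exact hall x hx⟩

lemma spass_zero_iff (l : List Int) : (fpass l).2 = 0 ↔ List.IsChain (· ≤ ·) l := by
  fun_induction fpass l with
  | case1 => simp
  | case2 a => simp
  | case3 a b rest hba r ih =>
    simp only [List.isChain_cons_cons]
    constructor
    · intro h; omega
    · intro h; omega
  | case4 a b rest hba r ih =>
    simp only [List.isChain_cons_cons]
    constructor
    · intro h; exact ⟨by omega, ih.mp h⟩
    · intro h; exact ih.mpr h.2

lemma invc_zero_of_sorted (l : List Int) (h : List.Pairwise (· ≤ ·) l) : invc l = 0 := by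
  induction l with
  | nil => rfl
  | cons x xs ih =>
    rw [List.pairwise_cons] at h
    have hz : xs.countP (fun y => decide (y < x)) = 0 :=
      List.countP_eq_zero.mpr (fun y hy => by simpa using not_lt.mpr (h.1 y hy))
    simp [invc, hz, ih h.2]

lemma gbl_entry_le (l : List Int) : ∀ pre, ∀ e ∈ gbl pre l, e ≤ pre.length + l.length - 1 := by
  induction l with
  | nil => intro pre e he; simp [gbl] at he
  | cons x xs ih =>
    intro pre e he
    simp only [gbl, List.mem_cons] at he
    rcases he with he | he
    · subst he
      have := List.countP_le_length (l := pre) (p := fun y => decide (y > x))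
      simp only [gbcnt, List.length_cons]
      omega
    · have := ih (pre ++ [x]) e he
      simp only [List.length_append, List.length_cons, List.length_nil] at this ⊢
      omega

lemma sum_gbcnt_append (pre : List Int) (x : Int) (xs : List Int) :
    (xs.map (fun y => gbcnt (pre ++ [x]) y)).sum
      = (xs.map (fun y => gbcnt pre y)).sum + xs.countP (fun y => decide (y < x)) := by
  induction xs with
  | nil => rfl
  | cons z zs ih =>
    simp only [List.map_cons, List.sum_cons, List.countP_cons, ih, decide_eq_true_eq]
    rw [gbcnt_append_singleton]
    split_ifs <;> omega

lemma sum_gbl (l : List Int) : ∀ pre,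
    (gbl pre l).sum = invc l + (l.map (fun x => gbcnt pre x)).sum := by
  induction l with
  | nil => intro pre; rfl
  | cons x xs ih =>
    intro pre
    simp only [gbl, List.sum_cons, ih (pre ++ [x]), invc, List.map_cons]
    rw [sum_gbcnt_append]
    omega

-- the main loop invariant: starting a pass with tail already in place and maximal
-- greater-before count k, the loop performs k+1 more passes and adds
-- csum k (front.length - 1) comparisons plus 3 * (remaining inversions)
-- a pass over a sorted front makes no swap, and all greater-before entries vanish
lemma sorted_front_of_maxl_zero {front : List Int} (h : maxl (gbl [] front) = 0) :
    List.Pairwise (· ≤ ·) front := by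
  refine (List.isChain_iff_pairwise.mp (gbl_all_zero_chain front [] ?_))
  intro e he
  have := le_maxl_of_mem he
  omega

lemma maxl_front_le {front : List Int} (h : front ≠ []) :
    maxl (gbl [] front) ≤ front.length - 1 := by
  refine maxl_le ?_
  intro e he
  have := gbl_entry_le front [] e he
  simpa using this

-- inversions of the whole list drop by exactly the number of swaps of a pass on the front
lemma invc_fpass_append (front tail : List Int) :
    invc (front ++ tail) = invc ((fpass front).1 ++ tail) + (fpass front).2 := by
  rw [invc_append, invc_append, invc_fpass front]
  have hperm := (fpass_perm front).map (fun x => tail.countP (fun y => decide (y < x)))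
  rw [hperm.sum_eq]
  ring

lemma bloop_spec (k : Nat) : ∀ (front tail : List Int) (c : Int) (fuel : Nat),
    maxl (gbl [] front) = k →
    (∀ x ∈ front, ∀ y ∈ tail, x ≤ y) →
    List.Pairwise (· ≤ ·) tail →
    k + 1 ≤ fuel →
    bloop fuel (front ++ tail) (tail.length + 1) c
      = c + (csum k (front.length - 1) : Int) + 3 * (invc (front ++ tail) : Int) := by
  induction k with
  | zero =>
    intro front tail c fuel hk hdom hsorted hfuel
    obtain ⟨f, rfl⟩ : ∃ f, fuel = f + 1 := ⟨fuel - 1, by omega⟩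
    rw [bloop_succ]
    have hsortedall : List.Pairwise (· ≤ ·) (front ++ tail) :=
      List.pairwise_append.mpr ⟨sorted_front_of_maxl_zero hk, hsorted, hdom⟩
    have hinv : invc (front ++ tail) = 0 := invc_zero_of_sorted _ hsortedall
    match front with
    | [] =>
      have hm : (([] : List Int) ++ tail).length - (tail.length + 1) = 0 := by simp
      rw [hm]
      simp only [List.nil_append] at hinv
      simp [bpass, csum, hinv]
    | a :: front' =>
      have hne : (a :: front') ≠ [] := by simp
      have hm : ((a :: front') ++ tail).length - (tail.length + 1) = (a :: front').length - 1 := by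
        simp only [List.length_append, List.length_cons]; omega
      rw [hm, bpass_split _ hne tail]
      have hs0 : (fpass (a :: front')).2 = 0 :=
        (spass_zero_iff _).mpr (List.isChain_iff_pairwise.mpr (sorted_front_of_maxl_zero hk))
      rw [hs0]
      simp only [ne_eq, decide_not, decide_true, Bool.not_true, Bool.false_eq_true, if_false]
      rw [hinv]
      have h1 : (1 : Nat) ≤ (a :: front').length := by simp
      simp only [csum]
      push_cast [Nat.cast_sub h1]
      ring
  | succ k ih =>
    intro front tail c fuel hk hdom hsorted hfuel
    obtain ⟨f, rfl⟩ : ∃ f, fuel = f + 1 := ⟨fuel - 1, by omega⟩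
    have hne : front ≠ [] := by
      rintro rfl
      simp [gbl, maxl] at hk
    have hlen2 : k + 2 ≤ front.length := by
      have := maxl_front_le hne
      have h1 : 1 ≤ front.length := List.length_pos_of_ne_nil hne
      omega
    rw [bloop_succ]
    have hm : (front ++ tail).length - (tail.length + 1) = front.length - 1 := by
      simp only [List.length_append]
      have := List.length_pos_of_ne_nil hne
      omega
    rw [hm, bpass_split _ hne tail]
    -- the pass swaps: the front is not sorted
    have hsne : (fpass front).2 ≠ 0 := by
      intro h0
      have hchain := (spass_zero_iff front).mp h0
      have hzeros := gbl_zeros front [] (by simp) (List.isChain_iff_pairwise.mp hchain)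
      have : maxl (gbl [] front) = 0 := Nat.le_antisymm (maxl_le (fun a ha => by rw [hzeros a ha])) (Nat.zero_le _)
      omega
    rw [(by simp [hsne] : (decide ((fpass front).2 ≠ 0)) = true)]
    simp only [if_true]
    -- split the pass result as u ++ [M]
    obtain ⟨u, M, hu, hall⟩ := fpass_last front hne
    have hperm := fpass_perm front
    have hulen : u.length + 1 = front.length := by
      have := hperm.length_eq
      rw [hu] at this
      simpa using this
    -- the greater-before profile dropped by one everywhere
    have hkey : (gbl [] (fpass front).1).Perm ((gbl [] front).map Nat.pred) := by
      match front, hne with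
      | a :: xs, _ => exact gbl_fpass xs a [] (by simp [gbcnt])
    have hmaxpass : maxl (gbl [] (fpass front).1) = k := by
      rw [maxl_perm hkey, maxl_map_pred, hk]
      rfl
    have hgM : gbcnt u M = 0 := by
      simp only [gbcnt, List.countP_eq_zero]
      intro y hy
      simpa using not_lt.mpr (hall y (List.mem_append_left _ hy))
    have hmaxu : maxl (gbl [] u) = k := by
      have hsplit : gbl [] (u ++ [M]) = gbl [] u ++ [gbcnt u M] := by
        rw [gbl_append]
        rfl
      have : maxl (gbl [] u ++ [gbcnt u M]) = k := by rw [← hsplit, ← hu, hmaxpass]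
      rw [hgM] at this
      rw [← this]
      refine Nat.le_antisymm (maxl_le fun a ha => le_maxl_of_mem (by simp [ha])) (maxl_le ?_)
      intro a ha
      rcases List.mem_append.mp ha with ha | ha
      · exact le_maxl_of_mem ha
      · simp only [List.mem_singleton] at ha
        omega
    have hmemfront : ∀ x ∈ u ++ [M], x ∈ front := by
      intro x hx
      rw [← hu] at hx
      exact hperm.mem_iff.mp hx
    have hdom' : ∀ x ∈ u, ∀ y ∈ M :: tail, x ≤ y := by
      intro x hx y hy
      rcases List.mem_cons.mp hy with rfl | hy
      · exact hall x (List.mem_append_left _ hx)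
      · exact hdom x (hmemfront x (List.mem_append_left _ hx)) y hy
    have hsorted' : List.Pairwise (· ≤ ·) (M :: tail) := by
      rw [List.pairwise_cons]
      exact ⟨fun y hy => hdom M (hmemfront M (by simp)) y hy, hsorted⟩
    have hres : (fpass front).1 ++ tail = u ++ (M :: tail) := by
      rw [hu, List.append_assoc]
      rfl
    have hih := ih u (M :: tail) (c + (((front.length : Int) - 1) + 3 * (fpass front).2)) f
      hmaxu hdom' hsorted' (by omega)
    rw [hres]
    have hpl : (M :: tail).length + 1 = tail.length + 1 + 1 := by simp
    rw [← hpl]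
    rw [hih]
    -- arithmetic
    have hinvrel : invc (front ++ tail) = invc (u ++ (M :: tail)) + (fpass front).2 := by
      rw [← hres]
      exact invc_fpass_append front tail
    have hulen1 : u.length - 1 = front.length - 1 - 1 := by omega
    rw [hulen1, hinvrel]
    have hcs : (csum (k + 1) (front.length - 1) : Int)
        = ((front.length - 1 : Nat) : Int) + (csum k (front.length - 1 - 1) : Int) := by
      simp only [csum]
      push_cast
      ring
    rw [hcs]
    have : ((front.length - 1 : Nat) : Int) = (front.length : Int) - 1 := by
      have : 1 ≤ front.length := by omega
      omega
    rw [this]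
    push_cast
    ring

lemma altGo_spec (l : List Int) : ∀ (pre : List Int) (i k : Int), 0 ≤ k →
    altGo l pre i k = (i + ((gbl pre l).sum : Int), max k ((maxl (gbl pre l) : Nat) : Int)) := by
  induction l with
  | nil =>
    intro pre i k hk
    simp [altGo, gbl, maxl, max_eq_left hk]
  | cons x xs ih =>
    intro pre i k hk
    have hmax : (if ((gbcnt pre x : Nat) : Int) > k then ((gbcnt pre x : Nat) : Int) else k)
        = max k (gbcnt pre x : Nat) := by
      rcases lt_or_ge k ((gbcnt pre x : Nat) : Int) with h | h
      · rw [if_pos h, max_eq_right h.le]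
      · rw [if_neg (not_lt.mpr h), max_eq_left h]
    simp only [altGo, gbcnt] at *
    rw [hmax, ih (pre ++ [x]) _ _ (le_trans hk (le_max_left _ _))]
    simp only [gbl, List.sum_cons, maxl, List.foldr_cons, Prod.mk.injEq, gbcnt]
    constructor
    · push_cast; ring
    · rw [Nat.cast_max, ← max_assoc]

lemma csum_gauss (k : Nat) : ∀ m : Nat, k ≤ m →
    (csum k m : Int) * 2 = ((k : Int) + 1) * (2 * m - k) := by
  induction k with
  | zero => intro m _; simp [csum]; ring
  | succ k ih =>
    intro m hm
    have h1 : k ≤ m - 1 := by omega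
    have hcast : ((m - 1 : Nat) : Int) = (m : Int) - 1 := by omega
    have := ih (m - 1) h1
    rw [hcast] at this
    simp only [csum]
    push_cast
    linear_combination this

-- ===== VERDICT (by name: the statement is the Claim_ definition above) =====
theorem tri_bulles_mieux_spec : Claim_equal_tri_bulles_mieux := by
  intro T _
  unfold Spec_tri_bulles_mieux
  match T with
  | [] => rfl
  | t :: ts =>
    have hne : (t :: ts) ≠ [] := by simp
    have hkle : maxl (gbl [] (t :: ts)) ≤ (t :: ts).length - 1 := maxl_front_le hne
    have hfuel : maxl (gbl [] (t :: ts)) + 1 ≤ (t :: ts).length + 1 := by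
      simp only [List.length_cons] at *
      omega
    have hA : tri_bulles_mieux (t :: ts)
        = (csum (maxl (gbl [] (t :: ts))) ((t :: ts).length - 1) : Int)
          + 3 * (invc (t :: ts) : Int) := by
      have hb := bloop_spec (maxl (gbl [] (t :: ts))) (t :: ts) [] 0 ((t :: ts).length + 1)
        rfl (by simp) (by simp) hfuel
      simp only [List.append_nil, List.length_nil] at hb
      unfold tri_bulles_mieux
      rw [hb]
      ring
    have hsum : (gbl [] (t :: ts)).sum = invc (t :: ts) := by
      rw [sum_gbl]
      have hmap : ((t :: ts).map (fun x => gbcnt [] x)) = (t :: ts).map (fun _ => 0) := by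
        simp [gbcnt]
      rw [hmap]
      simp
    have halt : tri_bulles_mieux_alt (t :: ts)
        = ((maxl (gbl [] (t :: ts)) : Int) + 1) * ((t :: ts).length : Int)
          - PySem.Int.floordiv
              (((maxl (gbl [] (t :: ts)) : Int) + 1) * (((maxl (gbl [] (t :: ts)) : Int) + 1) + 1)) 2
          + 3 * (invc (t :: ts) : Int) := by
      unfold tri_bulles_mieux_alt
      rw [if_neg (by simp)]
      rw [altGo_spec _ _ _ _ le_rfl]
      rw [max_eq_right (Int.natCast_nonneg _), hsum]
      ring_nf
    rw [hA, halt]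
    -- arithmetic: csum k (n-1) = (k+1)*n - (k+1)*(k+2)/2 for k ≤ n-1
    obtain ⟨d, hd⟩ : Even (((maxl (gbl [] (t :: ts)) : Int) + 1)
        * (((maxl (gbl [] (t :: ts)) : Int) + 1) + 1)) := Int.even_mul_succ_self _
    have hd2 : ((maxl (gbl [] (t :: ts)) : Int) + 1) * (((maxl (gbl [] (t :: ts)) : Int) + 1) + 1)
        = 2 * d := by linarith
    have hfd : PySem.Int.floordiv
        (((maxl (gbl [] (t :: ts)) : Int) + 1) * (((maxl (gbl [] (t :: ts)) : Int) + 1) + 1)) 2 = d := by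
      rw [PySem.Int.floordiv_eq_ediv_of_pos (by norm_num), hd2]
      omega
    rw [hfd]
    have hg := csum_gauss (maxl (gbl [] (t :: ts))) ((t :: ts).length - 1) hkle
    have hcast : (((t :: ts).length - 1 : Nat) : Int) = ((t :: ts).length : Int) - 1 := by
      simp only [List.length_cons]
      omega
    rw [hcast] at hg
    have h2 : 2 * ((csum (maxl (gbl [] (t :: ts))) ((t :: ts).length - 1) : Nat) : Int)
        = 2 * ((((maxl (gbl [] (t :: ts)) : Int) + 1) * ((t :: ts).length : Int)) - d) := by
      linear_combination hg - hd2
    have h3 := mul_left_cancel₀ (two_ne_zero) h2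
    rw [h3]
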